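-- pv_equiv track=rewrite | github.com/BlakeMasters/Soma-Cube-Project | backend/utils.py | extract_all_solutions
-- ===== SOURCE A (Python) =====
-- def extract_all_solutions(output):
--     """Extract all solutions from the solver's output"""
--     solutions = []
--     current_solution = []
--     in_solution = False
--
--     for line in output.split('\n'):
--         line = line.strip()
--         if not line:
--             continue
--
--         if line.startswith('solution #'):
--             if current_solution:
--                 solution = []
--                 for i in range(0, 9, 3):
--                     layer = '\n'.join(current_solution[i:i+3])
--                     solution.append(layer)
--                 solutions.append('\n\n'.join(solution))
--             current_solution = []
--             in_solution = True
--             continue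
--
--         if in_solution and len(current_solution) < 9:
--             current_solution.append(line)
--
--     # Add the last solution if exists
--     if current_solution:
--         solution = []
--         for i in range(0, 9, 3):
--             layer = '\n'.join(current_solution[i:i+3])
--             solution.append(layer)
--         solutions.append('\n\n'.join(solution))
--
--     return solutions
-- ===== SOURCE B (Python) =====
-- def _fmt(grp):
--     return '\n\n'.join('\n'.join(grp[i:i+3]) for i in (0, 3, 6))
--
--
-- def extract_all_solutions(output):
--     """Extract all solutions from the solver's output"""
--     # pass 1: the stripped, non-empty lines
--     lines = [s for s in map(str.strip, output.split('\n')) if s]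
--     # drop everything before the first 'solution #' marker
--     while lines and not lines[0].startswith('solution #'):
--         lines = lines[1:]
--     # pass 2: slice out each marker's block (at most 9 lines) and format it
--     res = []
--     while lines:
--         rest = lines[1:]
--         k = 0
--         while k < len(rest) and not rest[k].startswith('solution #'):
--             k += 1
--         grp = rest[:min(k, 9)]
--         if grp:
--             res.append(_fmt(grp))
--         lines = rest[k:]
--     return res
-- ===== Notes on version B (the rewrite author's own statement) =====
-- stated objective: alternative
-- what changed: Replaces A's one-pass state machine (in_solution flag, running buffer, duplicated end-of-input flush) with a pipeline: clean the lines, drop the pre-marker prefix, then repeatedly slice out each marker's block (capped at 9 lines) and format non-empty blocks; the flush logic disappears.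
import Mathlib
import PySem

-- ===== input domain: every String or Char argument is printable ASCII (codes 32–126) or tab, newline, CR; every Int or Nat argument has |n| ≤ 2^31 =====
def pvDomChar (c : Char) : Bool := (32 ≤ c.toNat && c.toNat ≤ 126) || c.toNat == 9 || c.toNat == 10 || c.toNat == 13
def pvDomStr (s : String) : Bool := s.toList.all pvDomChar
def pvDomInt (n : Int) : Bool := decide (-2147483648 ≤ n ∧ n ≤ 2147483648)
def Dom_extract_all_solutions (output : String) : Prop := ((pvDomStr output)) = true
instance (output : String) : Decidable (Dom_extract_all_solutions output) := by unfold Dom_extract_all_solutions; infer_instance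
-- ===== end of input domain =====

-- B replaces A's one-pass in_solution state machine (with its duplicated end-of-input
-- flush) by a pipeline: clean lines, drop the pre-marker prefix, then slice out each
-- marker's block (capped at 9 lines) and format the non-empty ones. Objective: alternative.

-- ===== PORT A =====
-- '\n\n'.join('\n'.join(current_solution[i:i+3]) for i in range(0, 9, 3))
def pvFmtA (cur : List String) : String :=
  PySem.Str.join "\n\n" ((PySem.List.pyRange 0 9 3).map (fun i =>
    PySem.Str.join "\n" (PySem.List.slice cur (some i) (some (i + 3)))))

-- the loop body after the blank-line 'continue' (line already stripped, non-empty)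
def pvStep (st : List String × List String × Bool) (line : String) :
    List String × List String × Bool :=
  if PySem.Str.startswith line "solution #" then
    ((if st.2.1 ≠ [] then st.1 ++ [pvFmtA st.2.1] else st.1), ([], true))
  else if st.2.2 && decide (st.2.1.length < 9) then (st.1, (st.2.1 ++ [line], st.2.2))
  else st

-- the full loop body: strip, skip empty lines, then pvStep
def pvLoopA (st : List String × List String × Bool) (raw : String) :
    List String × List String × Bool :=
  let line := PySem.Str.strip raw
  if line = "" then st else pvStep st line

def extract_all_solutions (output : String) : List String :=
  let st := ((PySem.Str.split? output "\n").getD []).foldl pvLoopA ([], ([], false))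
  if st.2.1 ≠ [] then st.1 ++ [pvFmtA st.2.1] else st.1

-- ===== PORT B =====
def pvMark (l : String) : Bool := PySem.Str.startswith l "solution #"

-- _fmt: '\n\n'.join('\n'.join(grp[i:i+3]) for i in (0, 3, 6))
def pvFmtB (grp : List String) : String :=
  PySem.Str.join "\n\n" (([0, 3, 6] : List Int).map (fun i =>
    PySem.Str.join "\n" (PySem.List.slice grp (some i) (some (i + 3)))))

-- 'while lines and not lines[0].startswith(...): lines = lines[1:]'
def pvDropPre : List String → List String
  | [] => []
  | l :: ls => if pvMark l then l :: ls else pvDropPre ls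

-- outer while loop: k = index of next marker in rest (the inner while loop,
-- transcribed as takeWhile-length), grp = rest[:min(k, 9)], continue on rest[k:]
def pvBlocks : List String → List String
  | [] => []
  | _ :: rest =>
    let k := (rest.takeWhile (fun l => !pvMark l)).length
    let grp := rest.take (min k 9)
    (if grp ≠ [] then [pvFmtB grp] else []) ++ pvBlocks (rest.drop k)
termination_by ls => ls.length
decreasing_by simp

def extract_all_solutions_alt (output : String) : List String :=
  pvBlocks (pvDropPre
    ((((PySem.Str.split? output "\n").getD []).map PySem.Str.strip).filter (fun s => s ≠ "")))

-- ===== PRECONDITION & SPEC =====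
def Spec_extract_all_solutions (output : String) (out : List String) : Prop := out = extract_all_solutions_alt output
instance (output : String) (out : List String) : Decidable (Spec_extract_all_solutions output out) := by unfold Spec_extract_all_solutions; infer_instance

-- ===== CLAIM (what is proved, stated in full; the proofs are below) =====
def Claim_equal_extract_all_solutions : Prop := ∀ (output : String), Dom_extract_all_solutions output → Spec_extract_all_solutions output (extract_all_solutions output)

-- ===== LEMMAS AND PROOFS =====

-- A's final flush (the last three lines of A), as a function of the loop state
def pvFinish (st : List String × List String × Bool) : List String :=
  if st.2.1 ≠ [] then st.1 ++ [pvFmtA st.2.1] else st.1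

theorem pvFmtAB (cur : List String) : pvFmtA cur = pvFmtB cur := by
  unfold pvFmtA pvFmtB
  rw [show PySem.List.pyRange 0 9 3 = [0, 3, 6] from by decide]

-- stripping/blank-skipping commutes out of the fold
theorem pvFold_filter (raws : List String) (st : List String × List String × Bool) :
    raws.foldl pvLoopA st
      = ((raws.map PySem.Str.strip).filter (fun s => s ≠ "")).foldl pvStep st := by
  induction raws generalizing st with
  | nil => rfl
  | cons r rs ih =>
      by_cases h : PySem.Str.strip r = "" <;>
        simp [pvLoopA, h, List.foldl, ih]

theorem pvDropWhile_eq_drop {α : Type} (p : α → Bool) (l : List α) :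
    l.dropWhile p = l.drop (l.takeWhile p).length := by
  induction l with
  | nil => rfl
  | cons x xs ih =>
      by_cases h : p x <;> simp [h, ih]

theorem pvTake_takeWhile {α : Type} (p : α → Bool) (l : List α) :
    l.take (l.takeWhile p).length = l.takeWhile p := by
  induction l with
  | nil => rfl
  | cons x xs ih =>
      by_cases h : p x <;> simp [h, ih]

theorem pvTake_min {α : Type} (p : α → Bool) (l : List α) (n : Nat) :
    l.take (min (l.takeWhile p).length n) = (l.takeWhile p).take n := by
  conv_rhs => rw [← pvTake_takeWhile p l, List.take_take]
  rw [Nat.min_comm]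

theorem pvBlocks_nil : pvBlocks [] = [] := by simp [pvBlocks]

theorem pvBlocks_cons (l : String) (rest : List String) :
    pvBlocks (l :: rest)
      = (if ((rest.takeWhile (fun l => !pvMark l)).take 9) ≠ []
         then [pvFmtB ((rest.takeWhile (fun l => !pvMark l)).take 9)] else [])
        ++ pvBlocks (rest.dropWhile (fun l => !pvMark l)) := by
  rw [pvBlocks.eq_def]
  dsimp only
  rw [pvTake_min, ← pvDropWhile_eq_drop]

-- the in-solution phase: the fold from state (sols, cur, true) flushes cur extended
-- by at most 9-|cur| lines up to the next marker, then behaves like pvBlocks on the rest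
theorem pvPhaseIn (ls : List String) :
    ∀ (sols cur : List String), cur.length ≤ 9 →
    pvFinish (ls.foldl pvStep (sols, (cur, true)))
      = sols ++
        ((if (cur ++ (ls.takeWhile (fun l => !pvMark l)).take (9 - cur.length)) ≠ []
          then [pvFmtB (cur ++ (ls.takeWhile (fun l => !pvMark l)).take (9 - cur.length))]
          else []) ++ pvBlocks (ls.dropWhile (fun l => !pvMark l))) := by
  induction ls with
  | nil =>
      intro sols cur _
      simp [pvFinish, pvBlocks_nil, pvFmtAB]
      by_cases h : cur = [] <;> simp [h]
  | cons l ls ih =>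
      intro sols cur hc
      by_cases hm : pvMark l
      · -- marker: flush cur, start a fresh block
        have hstep : pvStep (sols, (cur, true)) l
            = ((if cur ≠ [] then sols ++ [pvFmtA cur] else sols), ([], true)) := by
          simp [pvStep, pvMark] at hm ⊢; simp [hm]
        have htw : (l :: ls).takeWhile (fun l => !pvMark l) = [] := by simp [hm]
        have hdw : (l :: ls).dropWhile (fun l => !pvMark l) = l :: ls := by simp [hm]
        rw [List.foldl_cons, hstep, ih _ [] (by simp), htw, hdw, pvBlocks_cons]
        simp [pvFmtAB]
        by_cases h : cur = [] <;> simp [h]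
      · -- non-marker line
        have htw : (l :: ls).takeWhile (fun l => !pvMark l)
            = l :: ls.takeWhile (fun l => !pvMark l) := by simp [hm]
        have hdw : (l :: ls).dropWhile (fun l => !pvMark l)
            = ls.dropWhile (fun l => !pvMark l) := by simp [hm]
        by_cases hlt : cur.length < 9
        · have hstep : pvStep (sols, (cur, true)) l = (sols, (cur ++ [l], true)) := by
            simp [pvStep, pvMark] at hm ⊢; simp [hm, hlt]
          rw [List.foldl_cons, hstep, ih _ (cur ++ [l]) (by simp; omega), htw, hdw]
          rw [List.take_cons (by omega : 0 < 9 - cur.length)]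
          rw [show 9 - (cur ++ [l]).length = 9 - cur.length - 1 by simp; omega]
          simp
        · have h9 : 9 - cur.length = 0 := by omega
          have hstep : pvStep (sols, (cur, true)) l = (sols, (cur, true)) := by
            simp [pvStep, pvMark] at hm ⊢; simp [hm, hlt]
          rw [List.foldl_cons, hstep, ih _ cur hc, htw, hdw, h9]
          simp

-- the pre-marker phase: from the initial state the fold skips lines until the
-- first marker, then produces exactly pvBlocks
theorem pvPhasePre (ls : List String) (sols : List String) :
    pvFinish (ls.foldl pvStep (sols, ([], false)))
      = sols ++ pvBlocks (pvDropPre ls) := by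
  induction ls generalizing sols with
  | nil => simp [pvFinish, pvDropPre, pvBlocks_nil]
  | cons l ls ih =>
      by_cases hm : pvMark l
      · have hstep : pvStep (sols, ([], false)) l = (sols, ([], true)) := by
          simp [pvStep, pvMark] at hm ⊢; simp [hm]
        rw [List.foldl_cons, hstep, pvPhaseIn ls sols [] (by simp), pvDropPre]
        simp only [hm, if_pos, pvBlocks_cons]
        simp
      · have hstep : pvStep (sols, ([], false)) l = (sols, ([], false)) := by
          simp [pvStep, pvMark] at hm ⊢; simp [hm]
        rw [List.foldl_cons, hstep, ih, pvDropPre]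
        simp [hm]

-- ===== VERDICT (by name: the statement is the Claim_ definition above) =====
theorem extract_all_solutions_spec : Claim_equal_extract_all_solutions := by
  intro output _
  unfold Spec_extract_all_solutions extract_all_solutions extract_all_solutions_alt
  show pvFinish _ = _
  rw [pvFold_filter, pvPhasePre]
  simp
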